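-- pv_equiv track=rewrite | github.com/rgomezandia/Projecto-AlgMeta. | NR.py | reduccionPob
-- ===== SOURCE A (Python) =====
-- def calcFitness (individuo):
--     contador=0
--     for i in range(1,len(individuo)+1):
--         for j in range(1,len(individuo)+1):
--             if (((i-j==individuo[i-1]-individuo[j-1]) or ((i-j)+(individuo[i-1]-individuo[j-1]))==0) and (individuo[i-1]!=individuo[j-1])):
--                     contador=contador+1
--     return contador
--
-- def reduccionPob(poblacionTotal):
--     for j in range (len(poblacionTotal)):
--         valorInicial = calcFitness(poblacionTotal[j])
--         posicion = j
--         for i in range (j,len(poblacionTotal)):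
--             newValor = calcFitness(poblacionTotal[i])
--             if (valorInicial > newValor):
--                 posicion = i
--                 valorInicial = newValor
--         poblacionTotal.insert(j,poblacionTotal.pop(posicion))
--     return (poblacionTotal[0:int(len(poblacionTotal)/2)])
-- ===== SOURCE B (Python) =====
-- def _fit(ind):
--     n = len(ind)
--     c = 0
--     for i in range(n):
--         for j in range(i + 1, n):
--             d = ind[i] - ind[j]
--             if d != 0 and (d == i - j or d == j - i):
--                 c += 1
--     return 2 * c
--
-- def reduccionPob(poblacionTotal):
--     orden = sorted(poblacionTotal, key=_fit)
--     return orden[:len(poblacionTotal) // 2]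
-- ===== Notes on version B (the rewrite author's own statement) =====
-- stated objective: faster
-- what changed: A runs an in-place selection sort that recomputes the O(n^2) queen-conflict fitness of every individual inside the argmin scan of every outer pass (O(P^2) fitness evaluations); B computes each fitness once (over i<j pairs only, doubled) and uses Python's built-in stable sort with that key, then slices the better half.
import Mathlib
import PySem

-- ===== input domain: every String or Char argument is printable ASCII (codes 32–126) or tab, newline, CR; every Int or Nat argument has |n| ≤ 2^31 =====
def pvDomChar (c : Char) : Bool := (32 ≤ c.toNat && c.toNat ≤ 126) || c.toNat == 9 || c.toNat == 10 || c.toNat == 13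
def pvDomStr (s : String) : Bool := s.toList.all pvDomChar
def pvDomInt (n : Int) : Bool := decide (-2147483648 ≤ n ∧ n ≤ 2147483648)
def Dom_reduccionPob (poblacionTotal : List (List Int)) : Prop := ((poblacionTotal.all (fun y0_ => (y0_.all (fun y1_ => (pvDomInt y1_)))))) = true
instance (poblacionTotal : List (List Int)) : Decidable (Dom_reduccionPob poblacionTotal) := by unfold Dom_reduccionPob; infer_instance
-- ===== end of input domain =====

-- B replaces A's O(P^2) repeated-fitness selection sort with one fitness evaluation per
-- individual (each over i<j pairs only, doubled) followed by one stable key sort.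
-- A sorts its argument in place; B does not mutate it — the equivalence proved here is
-- about the RETURN value only.

-- ===== PORT A =====
def calcFitness (individuo : List Int) : Int :=
  (PySem.List.pyRange 1 ((individuo.length : Int) + 1)).foldl (fun contador i =>
    (PySem.List.pyRange 1 ((individuo.length : Int) + 1)).foldl (fun contador j =>
      if ((i - j == PySem.List.pyGetD individuo (i-1) 0 - PySem.List.pyGetD individuo (j-1) 0)
          || ((i - j) + (PySem.List.pyGetD individuo (i-1) 0 - PySem.List.pyGetD individuo (j-1) 0) == 0))
         && (PySem.List.pyGetD individuo (i-1) 0 != PySem.List.pyGetD individuo (j-1) 0)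
      then contador + 1 else contador) contador) 0

-- the body of A's inner argmin loop (i runs over range(j, len))
def pvInnerStep (lst : List (List Int)) (st : Int × Int) (i : Int) : Int × Int :=
  let newValor := calcFitness (PySem.List.pyGetD lst i [])
  if st.2 > newValor then (i, newValor) else st

-- the body of A's outer loop: find first argmin of calcFitness on lst[j:], pop it, re-insert at j
def pvBody (lst : List (List Int)) (j : Int) : List (List Int) :=
  let valorInicial := calcFitness (PySem.List.pyGetD lst j [])
  let st := (PySem.List.pyRange j (lst.length : Int)).foldl (pvInnerStep lst) (j, valorInicial)
  match PySem.List.pop? lst st.1 with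
  | some r => PySem.List.insert r.2 j r.1
  | none => lst

def reduccionPob (poblacionTotal : List (List Int)) : List (List Int) :=
  let final := (PySem.List.pyRange 0 (poblacionTotal.length : Int)).foldl pvBody poblacionTotal
  PySem.List.slice final (some 0) (some (PySem.Int.floordiv (final.length : Int) 2))

-- ===== PORT B =====
def fitness_alt (ind : List Int) : Int :=
  let n := (ind.length : Int)
  let c := (PySem.List.pyRange 0 n).foldl (fun c i =>
    (PySem.List.pyRange (i+1) n).foldl (fun c j =>
      let d := PySem.List.pyGetD ind i 0 - PySem.List.pyGetD ind j 0
      if (d != 0) && ((d == i - j) || (d == j - i)) then c + 1 else c) c) 0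
  2 * c

def reduccionPob_alt (poblacionTotal : List (List Int)) : List (List Int) :=
  let orden := PySem.List.sorted poblacionTotal (fun ind => fitness_alt ind)
  PySem.List.slice orden none (some (PySem.Int.floordiv (poblacionTotal.length : Int) 2))

-- ===== PRECONDITION & SPEC =====
def Spec_reduccionPob (poblacionTotal : List (List Int)) (out : List (List Int)) : Prop := out = reduccionPob_alt poblacionTotal
instance (poblacionTotal : List (List Int)) (out : List (List Int)) : Decidable (Spec_reduccionPob poblacionTotal out) := by unfold Spec_reduccionPob; infer_instance

-- ===== CLAIM (what is proved, stated in full; the proofs are below) =====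
def Claim_equal_reduccionPob : Prop := ∀ (poblacionTotal : List (List Int)), Dom_reduccionPob poblacionTotal → Spec_reduccionPob poblacionTotal (reduccionPob poblacionTotal)


-- ===== LEMMAS AND PROOFS =====

def pvExtract : List (List Int) → Option (Nat × List Int)
  | [] => none
  | x :: xs => match pvExtract xs with
    | none => some (0, x)
    | some (p, m) => if calcFitness x ≤ calcFitness m then some (0, x) else some (p + 1, m)
def pvSel : Nat → List (List Int) → List (List Int)
  | 0, _ => []
  | f + 1, l => match pvExtract l with
    | none => []
    | some (p, m) => m :: pvSel f (l.eraseIdx p)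
def pvArg : List (List Int) → Int → Int × Int → Int × Int
  | [], _, st => st
  | x :: s, i, st => pvArg s (i + 1) (if st.2 > calcFitness x then (i, calcFitness x) else st)


lemma pvExtract_eq_none_iff (l : List (List Int)) : pvExtract l = none ↔ l = [] := by
  cases l with
  | nil => simp [pvExtract]
  | cons x xs =>
    simp only [pvExtract]
    cases h : pvExtract xs <;> simp_all <;> split <;> simp

lemma pvExtract_spec (l : List (List Int)) : ∀ (p : Nat) (m : List Int),
    pvExtract l = some (p, m) →
    p < l.length ∧ l.getD p [] = m ∧
    (∀ y ∈ l.take p, calcFitness m < calcFitness y) ∧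
    (∀ y ∈ l, calcFitness m ≤ calcFitness y) := by
  induction l with
  | nil => intro p m h; simp [pvExtract] at h
  | cons x xs ih =>
    intro p m h
    simp only [pvExtract] at h
    cases hx : pvExtract xs with
    | none =>
      rw [hx] at h
      simp at h
      obtain ⟨hp, hm⟩ := h
      subst hp; subst hm
      have hnil : xs = [] := (pvExtract_eq_none_iff xs).1 hx
      subst hnil
      simp
    | some pm =>
      obtain ⟨q, m'⟩ := pm
      rw [hx] at h
      obtain ⟨hq, hm', h1, h2⟩ := ih q m' hx
      by_cases hle : calcFitness x ≤ calcFitness m'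
      · simp [hle] at h
        obtain ⟨hp, hm⟩ := h
        subst hp; subst hm
        refine ⟨by simp, by simp, by simp, ?_⟩
        intro y hy
        rcases List.mem_cons.1 hy with rfl | hy
        · exact le_refl _
        · exact le_trans hle (h2 y hy)
      · simp [hle] at h
        obtain ⟨hp, hm⟩ := h
        subst hm
        subst hp
        push_neg at hle
        constructor
        · simp; omega
        refine ⟨?_, ?_, ?_⟩
        · simpa using hm'
        · intro y hy
          simp only [List.take_succ_cons] at hy
          rcases List.mem_cons.1 hy with rfl | hy
          · exact hle
          · exact h1 y hy
        · intro y hy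
          rcases List.mem_cons.1 hy with rfl | hy
          · exact le_of_lt hle
          · exact h2 y hy



lemma pvArg_spec (s : List (List Int)) : ∀ (i q v : Int),
    pvArg s i (q, v) = (match pvExtract s with
      | none => (q, v)
      | some (p, m) => if calcFitness m < v then (i + p, calcFitness m) else (q, v)) := by
  induction s with
  | nil => intro i q v; simp [pvArg, pvExtract]
  | cons x s ih =>
    intro i q v
    simp only [pvArg]
    have hnil : ∀ t : List (List Int), pvExtract t = none → t = [] := by
      intro t ht
      cases t with
      | nil => rfl
      | cons a u => simp only [pvExtract] at ht; cases h : pvExtract u <;> rw [h] at ht <;> simp at ht <;> split at ht <;> simp_all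
    by_cases h1 : v > calcFitness x
    · rw [if_pos h1, ih]
      cases hx : pvExtract s with
      | none =>
        have := hnil s hx; subst this
        simp only [pvExtract]
        simp [show calcFitness x < v from h1]
      | some pm =>
        obtain ⟨p, m⟩ := pm
        simp only [pvExtract, hx]
        by_cases h2 : calcFitness x ≤ calcFitness m
        · have hmx : ¬ calcFitness m < calcFitness x := by omega
          simp [h2, hmx, show calcFitness x < v from h1]
        · have hmx : calcFitness m < calcFitness x := by omega
          have hmv : calcFitness m < v := by omega
          simp [h2, hmx, hmv]
          omega
    · rw [if_neg h1, ih]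
      cases hx : pvExtract s with
      | none =>
        have := hnil s hx; subst this
        simp only [pvExtract]
        simp [show ¬ calcFitness x < v from h1]
      | some pm =>
        obtain ⟨p, m⟩ := pm
        simp only [pvExtract, hx]
        by_cases h2 : calcFitness x ≤ calcFitness m
        · have h3 : ¬ calcFitness m < v := by omega
          simp [h2, h3, show ¬ calcFitness x < v from h1]
        · by_cases h3 : calcFitness m < v
          · simp [h2, h3]
            omega
          · simp [h2, h3]



lemma pvRange_nil (a b : Int) (h : b ≤ a) : PySem.List.pyRange a b = [] := by
  simp [PySem.List.pyRange, show ¬ (a < b) by omega]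

lemma pvEraseIdx_split (l : List (List Int)) (j p : Nat) :
    l.eraseIdx (j + p) = l.take j ++ (l.drop j).eraseIdx p := by
  rw [List.eraseIdx_eq_take_drop_succ, List.eraseIdx_eq_take_drop_succ,
      List.take_add, List.drop_drop, List.append_assoc]
  congr 1

lemma pvInner_eq_pvArg (lst : List (List Int)) : ∀ (k : Nat) (st : Int × Int),
    (PySem.List.pyRange (k : Int) (lst.length : Int)).foldl (pvInnerStep lst) st
    = pvArg (lst.drop k) (k : Int) st := by
  intro k st
  induction hn : lst.length - k generalizing k st with
  | zero =>
    have hk : lst.length ≤ k := by omega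
    rw [pvRange_nil _ _ (by exact_mod_cast hk), List.drop_eq_nil_of_le hk]
    rfl
  | succ n ih =>
    have hk : k < lst.length := by omega
    rw [PySem.List.pyRange_one_cons (by exact_mod_cast hk)]
    rw [List.foldl_cons]
    have hg : PySem.List.pyGetD lst (k : Int) [] = lst[k] := by
      rw [PySem.List.pyGetD_natCast, List.getD_eq_getElem _ _ hk]
    rw [List.drop_eq_getElem_cons hk]
    simp only [pvArg, pvInnerStep, hg]
    have hcast : ((k : Int) + 1) = ((k + 1 : Nat) : Int) := by push_cast; ring
    rw [hcast, ih (k + 1) _ (by omega)]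

lemma pvOuter (n : Nat) : ∀ (k : Nat) (lst : List (List Int)), lst.length = n →
    (PySem.List.pyRange (k : Int) (n : Int)).foldl pvBody lst
    = lst.take k ++ pvSel (n - k) (lst.drop k) := by
  intro k lst hlen
  induction hn : n - k generalizing k lst with
  | zero =>
    have hk : n ≤ k := by omega
    rw [pvRange_nil _ _ (by exact_mod_cast hk)]
    simp only [List.foldl_nil, pvSel]
    rw [List.take_of_length_le (by omega)]
    simp
  | succ f ih =>
    have hk : k < n := by omega
    rw [PySem.List.pyRange_one_cons (by exact_mod_cast hk), List.foldl_cons]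
    have hkl : k < lst.length := by omega
    have hg : PySem.List.pyGetD lst (k : Int) [] = lst[k] := by
      rw [PySem.List.pyGetD_natCast, List.getD_eq_getElem _ _ hkl]
    obtain ⟨P, M, hPM⟩ : ∃ P M, pvExtract (lst.drop k) = some (P, M) := by
      cases hx : pvExtract (lst.drop k) with
      | none =>
        exfalso
        have h0 := (pvExtract_eq_none_iff _).1 hx
        have h1 : (lst.drop k).length = 0 := by rw [h0]; rfl
        simp at h1; omega
      | some pm =>
        obtain ⟨a, b⟩ := pm
        exact ⟨a, b, rfl⟩
    obtain ⟨hPlt, hPget, hPtake, hPall⟩ := pvExtract_spec _ _ _ hPM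
    have hdl : (lst.drop k).length = n - k := by simp [hlen]
    have hdropk := List.drop_eq_getElem_cons hkl
    have hexp : pvArg (lst.drop k) (k : Int) ((k : Int), calcFitness lst[k]) = ((k : Int) + (P : Int), calcFitness M) := by
      rw [hdropk]
      simp only [pvArg]
      rw [if_neg (by omega)]
      rw [pvArg_spec]
      cases hx : pvExtract (List.drop (k + 1) lst) with
      | none =>
        rw [hdropk] at hPM
        simp only [pvExtract, hx] at hPM
        simp at hPM
        obtain ⟨h1, h2⟩ := hPM
        subst h1; subst h2
        simp
      | some pm =>
        obtain ⟨q, m'⟩ := pm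
        rw [hdropk] at hPM
        simp only [pvExtract, hx] at hPM
        by_cases h2 : calcFitness lst[k] ≤ calcFitness m'
        · rw [if_pos h2, Option.some.injEq, Prod.mk.injEq] at hPM
          obtain ⟨h1, h3⟩ := hPM
          rw [← h1, ← h3]
          simp [show ¬ calcFitness m' < calcFitness lst[k] by omega]
        · rw [if_neg h2, Option.some.injEq, Prod.mk.injEq] at hPM
          obtain ⟨h1, h3⟩ := hPM
          rw [← h1, ← h3]
          simp [show calcFitness m' < calcFitness lst[k] by omega]
          omega
    simp only [pvBody]
    rw [pvInner_eq_pvArg, hg, hexp]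
    have hkP : k + P < lst.length := by omega
    have hcast2 : ((k : Int) + (P : Int)) = ((k + P : Nat) : Int) := by push_cast; ring
    rw [hcast2, PySem.List.pop?_natCast _ _ hkP]
    have hMval : lst[k + P] = M := by
      have h1 : (lst.drop k)[P]'(by omega) = lst[k + P] := List.getElem_drop
      rw [← h1, ← List.getD_eq_getElem _ [] (by omega), hPget]
    simp only
    have hjle : k ≤ (lst.eraseIdx (k + P)).length := by
      rw [List.length_eraseIdx]
      simp [hkP]; omega
    rw [PySem.List.insert_natCast _ _ _ hjle]
    rw [pvEraseIdx_split]
    have htk : (lst.take k).length = k := by simp; omega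
    have hnew_take : ((lst.take k ++ (lst.drop k).eraseIdx P).take k) = lst.take k := by
      rw [List.take_append, htk]
      simp [List.take_take]
    have hnew_drop : ((lst.take k ++ (lst.drop k).eraseIdx P).drop k) = (lst.drop k).eraseIdx P := by
      rw [List.drop_append, htk]
      simp [List.drop_eq_nil_of_le, htk]
    rw [hnew_take, hnew_drop, hMval]
    have hel : ((lst.drop k).eraseIdx P).length = n - k - 1 := by
      rw [List.length_eraseIdx]
      simp [hdl]
      omega
    have hlen' : (lst.take k ++ M :: (lst.drop k).eraseIdx P).length = n := by
      simp [htk, hel]; omega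
    have hstep := ih (k + 1) _ hlen' (by omega)
    have hc3 : ((k : Int) + 1) = ((k + 1 : Nat) : Int) := by push_cast; ring
    rw [hc3, hstep]
    have h1 : (lst.take k ++ M :: (lst.drop k).eraseIdx P).take (k + 1) = lst.take k ++ [M] := by
      rw [List.take_append, htk]
      simp [List.take_take]
    have h2 : (lst.take k ++ M :: (lst.drop k).eraseIdx P).drop (k + 1) = (lst.drop k).eraseIdx P := by
      rw [List.drop_append, htk]
      simp [List.drop_eq_nil_of_le, htk]
    rw [h1, h2]
    simp only [pvSel, hPM]
    simp [List.append_assoc]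



lemma pvInsertBy_cons (x m : List Int) (acc : List (List Int))
    (h : ¬ calcFitness x < calcFitness m) :
    PySem.List.insertBy (fun a b => decide (calcFitness a < calcFitness b)) x (m :: acc)
    = m :: PySem.List.insertBy (fun a b => decide (calcFitness a < calcFitness b)) x acc := by
  simp only [PySem.List.insertBy]
  rw [if_neg (by simpa using h)]

lemma pvInsertBy_min (m : List Int) (acc : List (List Int))
    (h : ∀ a ∈ acc, calcFitness m < calcFitness a) :
    PySem.List.insertBy (fun a b => decide (calcFitness a < calcFitness b)) m acc = m :: acc := by
  cases acc with
  | nil => rfl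
  | cons a t =>
    simp only [PySem.List.insertBy]
    rw [if_pos (by simpa using h a (List.mem_cons_self))]

lemma pvFoldl_insertBy_min (m : List Int) : ∀ (l₂ : List (List Int)) (acc : List (List Int)),
    (∀ y ∈ l₂, calcFitness m ≤ calcFitness y) →
    l₂.foldl (fun acc x => PySem.List.insertBy (fun a b => decide (calcFitness a < calcFitness b)) x acc) (m :: acc)
    = m :: l₂.foldl (fun acc x => PySem.List.insertBy (fun a b => decide (calcFitness a < calcFitness b)) x acc) acc := by
  intro l₂
  induction l₂ with
  | nil => intro acc _; rfl
  | cons y t ih =>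
    intro acc hall
    rw [List.foldl_cons, List.foldl_cons]
    rw [pvInsertBy_cons y m acc (by have := hall y (List.mem_cons_self); omega)]
    exact ih _ (fun z hz => hall z (List.mem_cons_of_mem _ hz))

lemma pvSorted_extract (l l₁ l₂ : List (List Int)) (m : List Int)
    (hdec : l = l₁ ++ m :: l₂)
    (h₁ : ∀ y ∈ l₁, calcFitness m < calcFitness y)
    (h : ∀ y ∈ l, calcFitness m ≤ calcFitness y) :
    PySem.List.sorted l calcFitness = m :: PySem.List.sorted (l₁ ++ l₂) calcFitness := by
  rw [PySem.List.sorted_eq_foldl_insertBy, PySem.List.sorted_eq_foldl_insertBy, hdec]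
  rw [List.foldl_append, List.foldl_append, List.foldl_cons]
  have hmemA : ∀ a ∈ l₁.foldl (fun acc x => PySem.List.insertBy (fun a b => decide (calcFitness a < calcFitness b)) x acc) [], a ∈ l₁ := by
    intro a ha
    rw [← PySem.List.sorted_eq_foldl_insertBy] at ha
    exact (PySem.List.mem_sorted _ _ _ _).1 ha
  rw [pvInsertBy_min m _ (fun a ha => h₁ a (hmemA a ha))]
  exact pvFoldl_insertBy_min m l₂ _ (fun y hy => h y (by rw [hdec]; exact List.mem_append_right _ (List.mem_cons_of_mem _ hy)))

lemma pvSel_eq_sorted : ∀ (n : Nat) (l : List (List Int)), l.length = n →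
    pvSel n l = PySem.List.sorted l calcFitness := by
  intro n
  induction n with
  | zero =>
    intro l h
    have : l = [] := List.eq_nil_of_length_eq_zero h
    subst this
    rfl
  | succ f ih =>
    intro l h
    obtain ⟨P, M, hPM⟩ : ∃ P M, pvExtract l = some (P, M) := by
      cases hx : pvExtract l with
      | none =>
        exfalso
        have h0 := (pvExtract_eq_none_iff _).1 hx
        rw [h0] at h; simp at h
      | some pm =>
        obtain ⟨a, b⟩ := pm
        exact ⟨a, b, rfl⟩
    obtain ⟨hPlt, hPget, hPtake, hPall⟩ := pvExtract_spec _ _ _ hPM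
    have hM : l[P] = M := by rw [← List.getD_eq_getElem _ [] hPlt, hPget]
    have hdec : l = l.take P ++ M :: l.drop (P + 1) := by
      conv_lhs => rw [← List.take_append_drop P l]
      rw [List.drop_eq_getElem_cons hPlt, hM]
    simp only [pvSel, hPM]
    rw [pvSorted_extract l (l.take P) (l.drop (P + 1)) M hdec hPtake hPall]
    rw [List.eraseIdx_eq_take_drop_succ]
    congr 1
    apply ih
    have h1 : (l.take P).length = P := by simp; omega
    have h2 : (l.drop (P + 1)).length = l.length - (P + 1) := by simp
    simp only [List.length_append, h1, h2]
    omega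



def pvCond (l : List Int) (a b : Nat) : Bool :=
  (((a : Int) - (b : Int) == l.getD a 0 - l.getD b 0)
    || ((a : Int) - (b : Int) + (l.getD a 0 - l.getD b 0) == 0))
  && (l.getD a 0 != l.getD b 0)

def pvT (l : List Int) (n : Nat) : Int :=
  ((List.range n).map (fun a =>
    ((List.range n).map (fun b => if pvCond l a b then (1 : Int) else 0)).sum)).sum

def pvV (l : List Int) (n : Nat) : Int :=
  ((List.range n).map (fun a =>
    ((List.range (n - (a + 1))).map (fun t => if pvCond l a (a + 1 + t) then (1 : Int) else 0)).sum)).sum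

lemma pvCond_symm (l : List Int) (a b : Nat) : pvCond l a b = pvCond l b a := by
  unfold pvCond
  rw [Bool.eq_iff_iff]
  simp only [Bool.and_eq_true, Bool.or_eq_true, beq_iff_eq, bne_iff_ne, ne_eq]
  omega

lemma pvCond_diag (l : List Int) (a : Nat) : pvCond l a a = false := by
  simp [pvCond]

lemma pvTriangle (l : List Int) : ∀ n, pvT l n = 2 * pvV l n := by
  intro n
  induction n with
  | zero => rfl
  | succ n ih =>
    have hT : pvT l (n + 1) = pvT l n + 2 * ((List.range n).map (fun a => if pvCond l a n then (1 : Int) else 0)).sum := by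
      simp only [pvT, List.range_succ, List.map_append, List.sum_append, List.map_cons,
        List.map_nil, List.sum_cons, List.sum_nil, pvCond_diag, Bool.false_eq_true, if_false,
        add_zero]
      have hrow : ((List.range n).map (fun b => if pvCond l n b then (1 : Int) else 0)).sum
          = ((List.range n).map (fun a => if pvCond l a n then (1 : Int) else 0)).sum := by
        congr 1
        exact List.map_congr_left (fun a _ => by rw [pvCond_symm])
      have hsplit : ((List.range n).map (fun a =>
          ((List.range n).map (fun b => if pvCond l a b then (1 : Int) else 0)).sum
            + (if pvCond l a n then (1 : Int) else 0))).sum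
          = pvT l n + ((List.range n).map (fun a => if pvCond l a n then (1 : Int) else 0)).sum := by
        rw [PySem.List.sum_map_add_int]
        rfl
      rw [hsplit, hrow]
      simp only [pvT]
      ring
    have hV : pvV l (n + 1) = pvV l n + ((List.range n).map (fun a => if pvCond l a n then (1 : Int) else 0)).sum := by
      simp only [pvV, List.range_succ, List.map_append, List.sum_append, List.map_cons,
        List.map_nil, List.sum_cons, List.sum_nil]
      have hlast : n + 1 - (n + 1) = 0 := by omega
      rw [hlast]
      simp only [List.range_zero, List.map_nil, List.sum_nil, add_zero]
      have hsplit : ((List.range n).map (fun a =>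
          ((List.range (n + 1 - (a + 1))).map (fun t => if pvCond l a (a + 1 + t) then (1 : Int) else 0)).sum)).sum
          = ((List.range n).map (fun a =>
              ((List.range (n - (a + 1))).map (fun t => if pvCond l a (a + 1 + t) then (1 : Int) else 0)).sum
                + (if pvCond l a n then (1 : Int) else 0))).sum := by
        apply congrArg
        apply List.map_congr_left
        intro a ha
        have han : a < n := List.mem_range.1 ha
        have h1 : n + 1 - (a + 1) = (n - (a + 1)) + 1 := by omega
        rw [h1, List.range_succ, List.map_append, List.sum_append]
        simp only [List.map_cons, List.map_nil, List.sum_cons, List.sum_nil, add_zero]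
        have h2 : a + 1 + (n - (a + 1)) = n := by omega
        rw [h2]
      rw [hsplit, PySem.List.sum_map_add_int]
    rw [hT, hV, ih]
    ring

lemma pvRange_natCast (a b : Nat) : PySem.List.pyRange (a : Int) (b : Int)
    = (List.range (b - a)).map (fun k : Nat => ((a + k : Nat) : Int)) := by
  unfold PySem.List.pyRange
  rw [if_neg (by norm_num)]
  by_cases h : a < b
  · rw [if_pos (by norm_num), if_pos (by exact_mod_cast h)]
    have hc : (((b : Int) - a + 1 - 1) / 1).toNat = b - a := by
      have h1 : ((b : Int) - a + 1 - 1) / 1 = (b : Int) - a := by simp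
      rw [h1]
      omega
    rw [hc]
    apply List.map_congr_left
    intro k _
    push_cast
    ring
  · rw [if_pos (by norm_num), if_neg (by omega)]
    have : b - a = 0 := by omega
    rw [this]
    rfl

lemma pvRange1 (n : Nat) : PySem.List.pyRange 1 ((n : Int) + 1)
    = (List.range n).map (fun a : Nat => ((a : Int) + 1)) := by
  have h := pvRange_natCast 1 (n + 1)
  simp only [Nat.cast_one, Nat.cast_add, Nat.add_sub_cancel] at h
  rw [h]
  apply List.map_congr_left
  intro k _
  ring

lemma calcFitness_eq_T (l : List Int) : calcFitness l = pvT l l.length := by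
  unfold calcFitness
  rw [PySem.List.foldl_congr_mem _ _
    (fun contador i => contador +
      ((PySem.List.pyRange 1 ((l.length : Int) + 1)).countP (fun j =>
        ((i - j == PySem.List.pyGetD l (i-1) 0 - PySem.List.pyGetD l (j-1) 0)
          || ((i - j) + (PySem.List.pyGetD l (i-1) 0 - PySem.List.pyGetD l (j-1) 0) == 0))
        && (PySem.List.pyGetD l (i-1) 0 != PySem.List.pyGetD l (j-1) 0)) : Int))
    0 (fun acc x _ => PySem.List.foldl_if_add_one _ _ _)]
  rw [PySem.List.foldl_add]
  rw [zero_add]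
  rw [pvRange1, List.map_map]
  unfold pvT
  apply congrArg
  apply List.map_congr_left
  intro a _
  simp only [Function.comp]
  rw [← PySem.List.sum_map_ite_one_zero, List.map_map]
  apply congrArg
  apply List.map_congr_left
  intro b _
  simp only [Function.comp]
  have hcnt : ∀ b : Nat,
      ((((a : Int) + 1 - ((b : Int) + 1) == PySem.List.pyGetD l ((a : Int) + 1 - 1) 0 - PySem.List.pyGetD l ((b : Int) + 1 - 1) 0)
        || (((a : Int) + 1 - ((b : Int) + 1)) + (PySem.List.pyGetD l ((a : Int) + 1 - 1) 0 - PySem.List.pyGetD l ((b : Int) + 1 - 1) 0) == 0))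
       && (PySem.List.pyGetD l ((a : Int) + 1 - 1) 0 != PySem.List.pyGetD l ((b : Int) + 1 - 1) 0))
      = pvCond l a b := by
    intro b
    have ea : ((a : Int) + 1 - 1) = (a : Int) := by ring
    have eb : ((b : Int) + 1 - 1) = (b : Int) := by ring
    have eab : ((a : Int) + 1 - ((b : Int) + 1)) = (a : Int) - (b : Int) := by ring
    rw [ea, eb, eab, PySem.List.pyGetD_natCast, PySem.List.pyGetD_natCast]
    rfl
  rw [hcnt b]

lemma fitness_alt_eq_V (l : List Int) : fitness_alt l = 2 * pvV l l.length := by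
  simp only [fitness_alt]
  apply congrArg
  rw [PySem.List.pyRange_zero_natCast]
  rw [PySem.List.foldl_congr_mem _ _
    (fun c i => c +
      ((PySem.List.pyRange (i + 1) (l.length : Int)).countP (fun j =>
        (PySem.List.pyGetD l i 0 - PySem.List.pyGetD l j 0 != 0)
        && ((PySem.List.pyGetD l i 0 - PySem.List.pyGetD l j 0 == i - j)
            || (PySem.List.pyGetD l i 0 - PySem.List.pyGetD l j 0 == j - i))) : Int))
    0 (fun acc x _ => PySem.List.foldl_if_add_one _ _ _)]
  rw [PySem.List.foldl_add, zero_add, List.map_map]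
  unfold pvV
  apply congrArg
  apply List.map_congr_left
  intro a _
  simp only [Function.comp]
  have hr : PySem.List.pyRange ((a : Int) + 1) (l.length : Int)
      = (List.range (l.length - (a + 1))).map (fun k : Nat => ((a : Int) + 1 + (k : Int))) := by
    have h := pvRange_natCast (a + 1) l.length
    simp only [Nat.cast_add, Nat.cast_one] at h
    rw [h]
  rw [hr]
  rw [← PySem.List.sum_map_ite_one_zero, List.map_map]
  apply congrArg
  apply List.map_congr_left
  intro t _
  simp only [Function.comp]
  have hb : ((PySem.List.pyGetD l (a : Int) 0 - PySem.List.pyGetD l ((a : Int) + 1 + (t : Int)) 0 != 0)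
      && ((PySem.List.pyGetD l (a : Int) 0 - PySem.List.pyGetD l ((a : Int) + 1 + (t : Int)) 0 == (a : Int) - ((a : Int) + 1 + (t : Int)))
          || (PySem.List.pyGetD l (a : Int) 0 - PySem.List.pyGetD l ((a : Int) + 1 + (t : Int)) 0 == ((a : Int) + 1 + (t : Int)) - (a : Int))))
      = pvCond l a (a + 1 + t) := by
    have e1 : ((a : Int) + 1 + (t : Int)) = (((a + 1 + t : Nat)) : Int) := by push_cast; ring
    rw [e1, PySem.List.pyGetD_natCast, PySem.List.pyGetD_natCast]
    unfold pvCond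
    rw [Bool.eq_iff_iff]
    simp only [Bool.and_eq_true, Bool.or_eq_true, beq_iff_eq, bne_iff_ne, ne_eq]
    push_cast
    omega
  rw [hb]

lemma fitness_alt_eq (l : List Int) : fitness_alt l = calcFitness l := by
  rw [fitness_alt_eq_V, calcFitness_eq_T, pvTriangle]



-- ===== VERDICT (by name: the statement is the Claim_ definition above) =====
theorem reduccionPob_spec : Claim_equal_reduccionPob := by
  intro l _
  unfold Spec_reduccionPob
  simp only [reduccionPob, reduccionPob_alt]
  have hfun : (fun ind => fitness_alt ind) = calcFitness := funext fitness_alt_eq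
  have h0 := pvOuter l.length 0 l rfl
  simp only [Nat.cast_zero] at h0
  rw [h0]
  simp only [Nat.sub_zero, List.take_zero, List.drop_zero, List.nil_append, hfun]
  rw [pvSel_eq_sorted l.length l rfl]
  rw [PySem.List.slice_zero_start]
  rw [PySem.List.length_sorted]
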